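-- pv_equiv track=rewrite | github.com/selcuksarikoz/opendev | app/logic/turn_orchestrator.py | _format_plan_items
-- ===== SOURCE A (Python) =====
-- def _format_plan_items(items: list[str], completed: int) -> str:
--     if not items:
--         return ""
--     lines = []
--     done = max(0, min(completed, len(items)))
--     for idx, item in enumerate(items):
--         mark = "x" if idx < done else " "
--         lines.append(f"- [{mark}] {item}")
--     return "\n".join(lines)
-- ===== SOURCE B (Python) =====
-- def _format_plan_items(items: list[str], completed: int) -> str:
--     done = max(0, min(completed, len(items)))
--     lines = [f"- [x] {item}" for item in items[:done]]
--     lines += [f"- [ ] {item}" for item in items[done:]]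
--     return "\n".join(lines)
-- ===== Notes on version B (the rewrite author's own statement) =====
-- stated objective: simpler
-- what changed: Replaces the guarded index loop with a per-item branch by a branch-free partition: the clamped done count slices items into a completed prefix and a pending suffix, each mapped to its line form, joined; the empty-list guard disappears since join([]) is ''.
import Mathlib
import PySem

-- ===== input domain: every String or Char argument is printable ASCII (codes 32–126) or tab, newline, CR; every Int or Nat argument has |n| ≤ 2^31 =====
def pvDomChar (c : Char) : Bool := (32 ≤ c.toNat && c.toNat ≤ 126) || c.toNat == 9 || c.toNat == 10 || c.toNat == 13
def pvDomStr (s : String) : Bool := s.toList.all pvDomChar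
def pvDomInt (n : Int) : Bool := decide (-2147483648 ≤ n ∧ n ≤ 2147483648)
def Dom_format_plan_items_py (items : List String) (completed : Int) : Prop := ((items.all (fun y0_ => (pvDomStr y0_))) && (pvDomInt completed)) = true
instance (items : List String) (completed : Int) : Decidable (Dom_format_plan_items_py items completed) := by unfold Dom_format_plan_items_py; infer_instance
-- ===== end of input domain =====

-- B replaces A's guarded index loop by a branch-free slice partition (completed prefix / pending suffix), for simplicity; return values proved equal on all inputs.

-- ===== PORT A =====
def format_plan_items_py (items : List String) (completed : Int) : String :=
  if items = [] then ""
  else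
    let done : Int := max 0 (min completed (items.length : Int))
    let lines : List String := (PySem.List.enumerate items 0).foldl
      (fun acc p =>
        let mark : String := if p.1 < done then "x" else " "
        acc ++ ["- [" ++ mark ++ "] " ++ p.2]) []
    PySem.Str.join "\n" lines

-- ===== PORT B =====
def format_plan_items_py_alt (items : List String) (completed : Int) : String :=
  let done : Int := max 0 (min completed (items.length : Int))
  let lines : List String :=
    (PySem.List.slice items none (some done)).map (fun item => "- [x] " ++ item)
    ++ (PySem.List.slice items (some done) none).map (fun item => "- [ ] " ++ item)
  PySem.Str.join "\n" lines

-- ===== PRECONDITION & SPEC =====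
def Spec_format_plan_items_py (items : List String) (completed : Int) (out : String) : Prop := out = format_plan_items_py_alt items completed
instance (items : List String) (completed : Int) (out : String) : Decidable (Spec_format_plan_items_py items completed out) := by unfold Spec_format_plan_items_py; infer_instance

-- ===== CLAIM (what is proved, stated in full; the proofs are below) =====
def Claim_equal_format_plan_items_py : Prop := ∀ (items : List String) (completed : Int), Dom_format_plan_items_py items completed → Spec_format_plan_items_py items completed (format_plan_items_py items completed)

-- ===== LEMMAS AND PROOFS =====

-- all indices of the enumerated block lie below d: every mark is "x"
lemma pv_map_enum_lt (l : List String) (d : Int) :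
    ∀ (s : Int), s + l.length ≤ d →
      (PySem.List.enumerate l s).map
        (fun p => "- [" ++ (if p.1 < d then "x" else " ") ++ "] " ++ p.2)
      = l.map (fun item => "- [x] " ++ item) := by
  induction l with
  | nil => intro s _; simp [PySem.List.enumerate_nil]
  | cons x xs ih =>
    intro s hs
    simp only [List.length_cons] at hs
    rw [PySem.List.enumerate_cons]
    simp only [List.map_cons]
    rw [if_pos (by omega), ih (s + 1) (by omega)]
    rfl

-- all indices of the enumerated block are ≥ d: every mark is " "
lemma pv_map_enum_ge (l : List String) (d : Int) :
    ∀ (s : Int), d ≤ s →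
      (PySem.List.enumerate l s).map
        (fun p => "- [" ++ (if p.1 < d then "x" else " ") ++ "] " ++ p.2)
      = l.map (fun item => "- [ ] " ++ item) := by
  induction l with
  | nil => intro s _; simp [PySem.List.enumerate_nil]
  | cons x xs ih =>
    intro s hs
    rw [PySem.List.enumerate_cons]
    simp only [List.map_cons]
    rw [if_neg (by omega), ih (s + 1) (by omega)]
    rfl

-- ===== VERDICT (by name: the statement is the Claim_ definition above) =====
theorem format_plan_items_py_spec : Claim_equal_format_plan_items_py := by
  intro items completed _
  unfold Spec_format_plan_items_py format_plan_items_py format_plan_items_py_alt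
  by_cases hnil : items = []
  · subst hnil
    simp [PySem.List.slice, PySem.Str.join]
  · rw [if_neg hnil]
    dsimp only
    have h0 : (0 : Int) ≤ max 0 (min completed (items.length : Int)) := le_max_left 0 _
    have hle : max 0 (min completed (items.length : Int)) ≤ (items.length : Int) := by
      apply max_le (by positivity) (min_le_right _ _)
    set d : Int := max 0 (min completed (items.length : Int)) with hd
    have hn : d.toNat ≤ items.length := by omega
    rw [PySem.List.foldl_append_singleton_eq_map, List.nil_append]
    rw [PySem.List.slice_to _ h0, PySem.List.slice_from _ h0]
    congr 1
    conv_lhs => rw [← List.take_append_drop d.toNat items]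
    rw [PySem.List.enumerate_append, List.map_append]
    have hlt : (List.take d.toNat items).length = d.toNat := List.length_take_of_le hn
    congr 1
    · exact pv_map_enum_lt _ d 0 (by rw [hlt]; omega)
    · exact pv_map_enum_ge _ d _ (by rw [hlt]; omega)
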